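-- pv_equiv track=rewrite | github.com/fireteam99/sectionnorm | python/normalization/normalizer.py | extract_word_features
-- ===== SOURCE A (Python) =====
-- def extract_word_features(word):
--     """extracts the prefix, digits, and suffix from a word
--
--     Given a (word) input, returns (features)
--     where
--         (features) = tuple containing:
--             * prefix {[str]} - [any characters that come before the first contiguous string of digits]
--             * digits {[str]} - [the first continuous sequence of digits]
--             * suffix {[str]} - [any characters that come after the first contiguous string of digits]
--
--     Arguments:
--         word {[str]} -- [a string of characters without spaces]
--     """
--     prefix = []
--     digits = []
--     suffix = []
--     # find first contiguous string of digits
--     found_first_digit = False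
--     for c in word:
--         if c.isdigit():
--             digits.append(c)
--             found_first_digit = True
--         elif found_first_digit:
--             suffix.append(c)
--         else:
--             prefix.append(c)
--
--     return ''.join(prefix), ''.join(digits), ''.join(suffix)
-- ===== SOURCE B (Python) =====
-- def extract_word_features(word):
--     i = next((j for j, c in enumerate(word) if c.isdigit()), None)
--     if i is None:
--         return word, '', ''
--     rest = word[i:]
--     return (word[:i],
--             ''.join(c for c in rest if c.isdigit()),
--             ''.join(c for c in rest if not c.isdigit()))
-- ===== Notes on version B (the rewrite author's own statement) =====
-- stated objective: alternative
-- what changed: Replaces the stateful single pass with a found_first_digit flag and three accumulators by find-first-digit-index, a slice for the prefix, and two filtered passes over the remainder.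
import Mathlib
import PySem

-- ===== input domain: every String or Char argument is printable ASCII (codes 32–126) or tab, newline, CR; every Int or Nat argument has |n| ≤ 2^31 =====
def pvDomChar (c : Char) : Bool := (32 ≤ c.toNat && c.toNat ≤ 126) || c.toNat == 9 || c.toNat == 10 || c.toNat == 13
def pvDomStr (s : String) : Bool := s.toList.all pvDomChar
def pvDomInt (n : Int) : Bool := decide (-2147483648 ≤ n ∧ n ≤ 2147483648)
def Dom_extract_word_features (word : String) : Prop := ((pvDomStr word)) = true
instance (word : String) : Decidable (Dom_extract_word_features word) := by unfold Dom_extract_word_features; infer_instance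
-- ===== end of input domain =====

-- B replaces A's stateful single pass (flag + three accumulators) by
-- find-first-digit-index, a prefix slice, and two filtered passes over the
-- remainder: a different decomposition, same cost.

-- ===== PORT A =====
-- loop body of A: state = (prefix, digits, suffix, found_first_digit)
def pvStepA (st : List Char × List Char × List Char × Bool) (c : Char) :
    List Char × List Char × List Char × Bool :=
  if PySem.Chars.isdigit c then (st.1, st.2.1 ++ [c], st.2.2.1, true)
  else if st.2.2.2 then (st.1, st.2.1, st.2.2.1 ++ [c], st.2.2.2)
  else (st.1 ++ [c], st.2.1, st.2.2.1, st.2.2.2)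

def extract_word_features (word : String) : String × String × String :=
  let st := word.toList.foldl pvStepA ([], [], [], false)
  (String.ofList st.1, String.ofList st.2.1, String.ofList st.2.2.1)

-- ===== PORT B =====
-- next((j for j,c in enumerate(word) if c.isdigit()), None) → findIdx?;
-- word[:i] / word[i:] with i a nonnegative in-range index → take / drop (exact there)
def extract_word_features_alt (word : String) : String × String × String :=
  let cs := word.toList
  match cs.findIdx? (fun c => PySem.Chars.isdigit c) with
  | none => (word, "", "")
  | some i =>
    let rest := cs.drop i
    (String.ofList (cs.take i),
     String.ofList (rest.filter (fun c => PySem.Chars.isdigit c)),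
     String.ofList (rest.filter (fun c => !PySem.Chars.isdigit c)))

-- ===== PRECONDITION & SPEC =====
def Spec_extract_word_features (word : String) (out : String × String × String) : Prop := out = extract_word_features_alt word
instance (word : String) (out : String × String × String) : Decidable (Spec_extract_word_features word out) := by unfold Spec_extract_word_features; infer_instance

-- ===== CLAIM (what is proved, stated in full; the proofs are below) =====
def Claim_equal_extract_word_features : Prop := ∀ (word : String), Dom_extract_word_features word → Spec_extract_word_features word (extract_word_features word)

-- ===== LEMMAS AND PROOFS =====

-- once the flag is true, digits collect the digit chars and suffix the rest
theorem pvFoldTrue (cs : List Char) : ∀ (p d s : List Char),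
    cs.foldl pvStepA (p, d, s, true) =
      (p, d ++ cs.filter (fun c => PySem.Chars.isdigit c),
          s ++ cs.filter (fun c => !PySem.Chars.isdigit c), true) := by
  induction cs with
  | nil => intro p d s; simp
  | cons c cs ih =>
    intro p d s
    by_cases h : PySem.Chars.isdigit c = true <;>
      simp [pvStepA, h, ih]

-- before the first digit, chars go to the prefix; A's fold characterised by findIdx?
theorem pvFoldFalse (cs : List Char) : ∀ (p : List Char),
    cs.foldl pvStepA (p, [], [], false) =
      match cs.findIdx? (fun c => PySem.Chars.isdigit c) with
      | none => (p ++ cs, [], [], false)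
      | some i => (p ++ cs.take i,
          (cs.drop i).filter (fun c => PySem.Chars.isdigit c),
          (cs.drop i).filter (fun c => !PySem.Chars.isdigit c), true) := by
  induction cs with
  | nil => intro p; simp
  | cons c cs ih =>
    intro p
    by_cases h : PySem.Chars.isdigit c = true
    · simp [pvStepA, h, List.findIdx?_cons, pvFoldTrue]
    · have step : pvStepA (p, [], [], false) c = (p ++ [c], [], [], false) := by
        simp [pvStepA, h]
      rw [List.foldl_cons, step, ih]
      cases hfi : cs.findIdx? (fun c => PySem.Chars.isdigit c) <;>
        simp [List.findIdx?_cons, h, hfi]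

-- ===== VERDICT (by name: the statement is the Claim_ definition above) =====
theorem extract_word_features_spec : Claim_equal_extract_word_features := by
  intro word _
  show _ = _
  unfold extract_word_features extract_word_features_alt
  rw [pvFoldFalse word.toList []]
  cases hfi : word.toList.findIdx? (fun c => PySem.Chars.isdigit c) <;>
    simp [hfi, String.ofList_toList]
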